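-- pv_equiv track=rewrite | github.com/benjaminvillalonga/scripts_shallow_QC | generate_circuit.py | cz_layer
-- ===== SOURCE A (Python) =====
-- def cz_layer(L1, L2, pattern_num):
--   """Function that generates the cz layer corresponding to the pattern_num.
--
--   Args:
--     L1: first spatial dimension.
--     L2: second spatial dimension.
--     pattern_num: number that labels the 8 different patterns of cz layers.
--
--   Returns:
--     A list with four-tuples with the (i1, i2, j1, j2) coords of the cz gates.
--
--   Raises:
--     ValueError: if pattern_num is not in [1,8].
--   """
--   if pattern_num<1 or pattern_num>8:
--     msg = 'pattern_num must be in the range [1,8].'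
--     raise ValueError(msg)
--
--   coords_list = []
--   if pattern_num==1:
--     for i2 in range(L2):
--       if i2%2==0:
--         coords_list += [(i1, i2, i1+1, i2) for i1 in range(0, L1-1, 4)]
--       else:
--         coords_list += [(i1, i2, i1+1, i2) for i1 in range(2, L1-1, 4)]
--   elif pattern_num==2:
--     for i1 in range(L2):
--       if i1%2==0:
--         coords_list += [(i1, i2, i1, i2+1) for i2 in range(1, L1-1, 4)]
--       else:
--         coords_list += [(i1, i2, i1, i2+1) for i2 in range(3, L1-1, 4)]
--   elif pattern_num==3:
--     for i2 in range(L2):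
--       if i2%2==0:
--         coords_list += [(i1, i2, i1+1, i2) for i1 in range(1, L1-1, 4)]
--       else:
--         coords_list += [(i1, i2, i1+1, i2) for i1 in range(3, L1-1, 4)]
--   elif pattern_num==4:
--     for i1 in range(L2):
--       if i1%2==0:
--         coords_list += [(i1, i2, i1, i2+1) for i2 in range(0, L1-1, 4)]
--       else:
--         coords_list += [(i1, i2, i1, i2+1) for i2 in range(2, L1-1, 4)]
--   elif pattern_num==5:
--     for i2 in range(L2):
--       if i2%2==0:
--         coords_list += [(i1, i2, i1+1, i2) for i1 in range(2, L1-1, 4)]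
--       else:
--         coords_list += [(i1, i2, i1+1, i2) for i1 in range(0, L1-1, 4)]
--   elif pattern_num==6:
--     for i1 in range(L2):
--       if i1%2==0:
--         coords_list += [(i1, i2, i1, i2+1) for i2 in range(3, L1-1, 4)]
--       else:
--         coords_list += [(i1, i2, i1, i2+1) for i2 in range(1, L1-1, 4)]
--   elif pattern_num==7:
--     for i2 in range(L2):
--       if i2%2==0:
--         coords_list += [(i1, i2, i1+1, i2) for i1 in range(1, L1-1, 4)]
--       else:
--         coords_list += [(i1, i2, i1+1, i2) for i1 in range(3, L1-1, 4)]
--   elif pattern_num==8: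
--     for i1 in range(L2):
--       if i1%2==0:
--         coords_list += [(i1, i2, i1, i2+1) for i2 in range(2, L1-1, 4)]
--       else:
--         coords_list += [(i1, i2, i1, i2+1) for i2 in range(0, L1-1, 4)]
--
--   return coords_list
-- ===== SOURCE B (Python) =====
-- def cz_layer(L1, L2, pattern_num):
--   if pattern_num < 1 or pattern_num > 8:
--     raise ValueError('pattern_num must be in the range [1,8].')
--   base = (0, 1, 1, 0, 2, 3, 1, 2)[pattern_num - 1]
--   horiz = pattern_num % 2 == 1
--   coords_list = []
--   for a in range(L2):
--     for b in range(L1 - 1):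
--       if b % 4 == (base + 2 * a) % 4:
--         coords_list.append((b, a, b + 1, a) if horiz else (a, b, a, b + 1))
--   return coords_list
-- ===== Notes on version B (the rewrite author's own statement) =====
-- stated objective: alternative
-- what changed: Replaces the 8 branch-specific strided range(start, L1-1, 4) iterations by a single scan of the whole (L2 x L1-1) grid that keeps a cell iff it satisfies the modular congruence b % 4 == (base + 2*a) % 4, with base and orientation computed arithmetically from pattern_num.
import Mathlib
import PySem

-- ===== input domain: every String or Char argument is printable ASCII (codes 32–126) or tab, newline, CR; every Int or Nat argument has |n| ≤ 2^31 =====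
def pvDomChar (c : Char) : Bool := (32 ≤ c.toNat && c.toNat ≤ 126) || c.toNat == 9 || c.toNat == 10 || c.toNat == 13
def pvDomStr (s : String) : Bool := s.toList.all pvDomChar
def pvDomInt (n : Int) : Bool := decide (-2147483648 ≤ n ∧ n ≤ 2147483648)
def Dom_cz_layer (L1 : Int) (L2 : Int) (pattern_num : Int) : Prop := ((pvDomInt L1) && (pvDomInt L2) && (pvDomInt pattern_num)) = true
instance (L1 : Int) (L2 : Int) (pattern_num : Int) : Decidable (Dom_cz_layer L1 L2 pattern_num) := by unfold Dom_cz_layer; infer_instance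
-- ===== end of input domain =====

-- B replaces A's 8 branch-specific strided ranges by one full-grid scan filtered by the
-- congruence b % 4 == (base + 2*a) % 4 (objective: alternative, same asymptotic cost).

-- ===== PORT A =====
def cz_layer (L1 : Int) (L2 : Int) (pattern_num : Int) : List (Int × Int × Int × Int) :=
  if pattern_num < 1 ∨ pattern_num > 8 then []  -- Python raises ValueError here; excluded by Pre_
  else if pattern_num = 1 then
    (PySem.List.pyRange 0 L2 1).foldl (fun acc i2 =>
      if PySem.Int.mod i2 2 = 0 then
        acc ++ (PySem.List.pyRange 0 (L1-1) 4).map (fun i1 => (i1, i2, i1+1, i2))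
      else
        acc ++ (PySem.List.pyRange 2 (L1-1) 4).map (fun i1 => (i1, i2, i1+1, i2))) []
  else if pattern_num = 2 then
    (PySem.List.pyRange 0 L2 1).foldl (fun acc i1 =>
      if PySem.Int.mod i1 2 = 0 then
        acc ++ (PySem.List.pyRange 1 (L1-1) 4).map (fun i2 => (i1, i2, i1, i2+1))
      else
        acc ++ (PySem.List.pyRange 3 (L1-1) 4).map (fun i2 => (i1, i2, i1, i2+1))) []
  else if pattern_num = 3 then
    (PySem.List.pyRange 0 L2 1).foldl (fun acc i2 =>
      if PySem.Int.mod i2 2 = 0 then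
        acc ++ (PySem.List.pyRange 1 (L1-1) 4).map (fun i1 => (i1, i2, i1+1, i2))
      else
        acc ++ (PySem.List.pyRange 3 (L1-1) 4).map (fun i1 => (i1, i2, i1+1, i2))) []
  else if pattern_num = 4 then
    (PySem.List.pyRange 0 L2 1).foldl (fun acc i1 =>
      if PySem.Int.mod i1 2 = 0 then
        acc ++ (PySem.List.pyRange 0 (L1-1) 4).map (fun i2 => (i1, i2, i1, i2+1))
      else
        acc ++ (PySem.List.pyRange 2 (L1-1) 4).map (fun i2 => (i1, i2, i1, i2+1))) []
  else if pattern_num = 5 then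
    (PySem.List.pyRange 0 L2 1).foldl (fun acc i2 =>
      if PySem.Int.mod i2 2 = 0 then
        acc ++ (PySem.List.pyRange 2 (L1-1) 4).map (fun i1 => (i1, i2, i1+1, i2))
      else
        acc ++ (PySem.List.pyRange 0 (L1-1) 4).map (fun i1 => (i1, i2, i1+1, i2))) []
  else if pattern_num = 6 then
    (PySem.List.pyRange 0 L2 1).foldl (fun acc i1 =>
      if PySem.Int.mod i1 2 = 0 then
        acc ++ (PySem.List.pyRange 3 (L1-1) 4).map (fun i2 => (i1, i2, i1, i2+1))
      else
        acc ++ (PySem.List.pyRange 1 (L1-1) 4).map (fun i2 => (i1, i2, i1, i2+1))) []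
  else if pattern_num = 7 then
    (PySem.List.pyRange 0 L2 1).foldl (fun acc i2 =>
      if PySem.Int.mod i2 2 = 0 then
        acc ++ (PySem.List.pyRange 1 (L1-1) 4).map (fun i1 => (i1, i2, i1+1, i2))
      else
        acc ++ (PySem.List.pyRange 3 (L1-1) 4).map (fun i1 => (i1, i2, i1+1, i2))) []
  else
    (PySem.List.pyRange 0 L2 1).foldl (fun acc i1 =>
      if PySem.Int.mod i1 2 = 0 then
        acc ++ (PySem.List.pyRange 2 (L1-1) 4).map (fun i2 => (i1, i2, i1, i2+1))
      else
        acc ++ (PySem.List.pyRange 0 (L1-1) 4).map (fun i2 => (i1, i2, i1, i2+1))) []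

-- ===== PORT B =====
-- Source B's 'base = (0,1,1,0,2,3,1,2)[pattern_num-1]' and 'horiz = pattern_num % 2 == 1'
def czBase (pattern_num : Int) : Int :=
  PySem.List.pyGetD [(0:Int), 1, 1, 0, 2, 3, 1, 2] (pattern_num - 1) 0

def czHoriz (pattern_num : Int) : Bool :=
  PySem.Int.mod pattern_num 2 == 1

def cz_layer_alt (L1 : Int) (L2 : Int) (pattern_num : Int) : List (Int × Int × Int × Int) :=
  if pattern_num < 1 ∨ pattern_num > 8 then []  -- Python raises ValueError here; excluded by Pre_
  else
    (PySem.List.pyRange 0 L2 1).foldl (fun acc a =>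
      (PySem.List.pyRange 0 (L1-1) 1).foldl (fun acc2 b =>
        if PySem.Int.mod b 4 = PySem.Int.mod (czBase pattern_num + 2*a) 4 then
          acc2 ++ [if czHoriz pattern_num then (b, a, b+1, a) else (a, b, a, b+1)]
        else acc2) acc) []

-- ===== PRECONDITION & SPEC =====
-- Pre_ excludes exactly pattern_num outside [1,8], where A (and B) raise ValueError.
def Pre_cz_layer (L1 : Int) (L2 : Int) (pattern_num : Int) : Prop :=
  1 ≤ pattern_num ∧ pattern_num ≤ 8
instance (L1 : Int) (L2 : Int) (pattern_num : Int) : Decidable (Pre_cz_layer L1 L2 pattern_num) := by unfold Pre_cz_layer; infer_instance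
def pvWitness_cz_layer : Int × Int × Int := (5, 4, 1)
def Spec_cz_layer (L1 : Int) (L2 : Int) (pattern_num : Int) (out : List (Int × Int × Int × Int)) : Prop := out = cz_layer_alt L1 L2 pattern_num
instance (L1 : Int) (L2 : Int) (pattern_num : Int) (out : List (Int × Int × Int × Int)) : Decidable (Spec_cz_layer L1 L2 pattern_num out) := by unfold Spec_cz_layer; infer_instance

-- ===== CLAIM =====
def Claim_equal_cz_layer : Prop := ∀ (L1 : Int) (L2 : Int) (pattern_num : Int), Dom_cz_layer L1 L2 pattern_num → Pre_cz_layer L1 L2 pattern_num → Spec_cz_layer L1 L2 pattern_num (cz_layer L1 L2 pattern_num)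

-- ===== LEMMAS AND PROOFS =====

theorem pymod_emod (x m : Int) (hm : 0 ≤ m) : PySem.Int.mod x m = x % m := by
  simp [PySem.Int.mod, Int.fmod_eq_emod, hm]

-- step-4 range grows on the right exactly when the new endpoint is ≡ s (mod 4)
theorem range4_succ (s n : Int) (h0 : 0 ≤ s) (h4 : s < 4) (hn : 1 ≤ n) :
    PySem.List.pyRange s n 4 =
      PySem.List.pyRange s (n-1) 4 ++ (if (n-1) % 4 = s then [(n-1)] else []) := by
  rw [PySem.List.pyRange_of_pos s n (by norm_num : (0:Int) < 4),
      PySem.List.pyRange_of_pos s (n-1) (by norm_num : (0:Int) < 4)]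
  by_cases hd : (n-1) % 4 = s
  · have h1 : (if s < n then ((n - s + 4 - 1) / 4).toNat else 0)
        = (if s < n - 1 then ((n - 1 - s + 4 - 1) / 4).toNat else 0) + 1 := by
      split_ifs <;> omega
    have h2 : s + 4 * ((if s < n - 1 then ((n - 1 - s + 4 - 1) / 4).toNat else 0 : Nat) : Int)
        = n - 1 := by
      split_ifs <;> push_cast <;> omega
    rw [h1, List.range_succ, List.map_append, List.map_cons, List.map_nil, if_pos hd, h2]
  · have h1 : (if s < n then ((n - s + 4 - 1) / 4).toNat else 0)
        = (if s < n - 1 then ((n - 1 - s + 4 - 1) / 4).toNat else 0) := by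
      split_ifs <;> omega
    rw [h1, if_neg hd, List.append_nil]

-- the congruence filter of the contiguous range IS the strided range
theorem filter_mod_range (s : Int) (h0 : 0 ≤ s) (h4 : s < 4) :
    ∀ (m : Nat) (n : Int), n ≤ (m : Int) →
      (PySem.List.pyRange 0 n 1).filter (fun b => decide (PySem.Int.mod b 4 = s))
        = PySem.List.pyRange s n 4 := by
  intro m
  induction m with
  | zero =>
      intro n hn
      have hn0 : n ≤ 0 := by omega
      rw [PySem.List.pyRange_one_eq_nil hn0,
          PySem.List.pyRange_of_pos s n (by norm_num : (0:Int) < 4)]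
      have hns : ¬ s < n := by omega
      rw [if_neg hns]
      simp
  | succ k ih =>
      intro n hn
      by_cases hk : n ≤ (k : Int)
      · exact ih n hk
      · have hn1 : 1 ≤ n := by omega
        have hsplit : n = (n-1) + 1 := by ring
        rw [hsplit, PySem.List.pyRange_one_succ_right (show (0:Int) ≤ n-1 by omega),
            List.filter_append, ih (n-1) (by omega)]
        have hb : PySem.Int.mod (n-1) 4 = (n-1) % 4 :=
          pymod_emod _ _ (by norm_num)
        rw [range4_succ s ((n-1)+1) h0 h4 (by omega)]
        simp only [add_sub_cancel_right, List.filter_cons, List.filter_nil, hb]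
        by_cases hd : (n-1) % 4 = s <;> simp [hd]

-- B's inner loop over a row equals the appended strided block
theorem inner_row (L1 a base : Int) (g : Int → Int → (Int × Int × Int × Int))
    (acc : List (Int × Int × Int × Int)) :
    (PySem.List.pyRange 0 (L1-1) 1).foldl (fun acc2 b =>
        if PySem.Int.mod b 4 = PySem.Int.mod (base + 2*a) 4 then acc2 ++ [g a b] else acc2) acc
      = acc ++ (PySem.List.pyRange (PySem.Int.mod (base + 2*a) 4) (L1-1) 4).map (g a) := by
  have hs0 : 0 ≤ PySem.Int.mod (base + 2*a) 4 := by
    rw [pymod_emod _ _ (by norm_num : (0:Int) ≤ 4)]; omega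
  have hs4 : PySem.Int.mod (base + 2*a) 4 < 4 := by
    rw [pymod_emod _ _ (by norm_num : (0:Int) ≤ 4)]; omega
  rw [PySem.List.foldl_append_ite, filter_mod_range _ hs0 hs4 (L1-1).toNat (L1-1) (by omega)]

-- generic per-pattern equivalence: A's even/odd strided blocks vs B's filtered grid scan
theorem pattern_eq (L1 L2 e o base : Int) (g : Int → Int → (Int × Int × Int × Int))
    (hbe : ∀ a : Int, PySem.Int.mod a 2 = 0 → PySem.Int.mod (base + 2*a) 4 = e)
    (hbo : ∀ a : Int, ¬ PySem.Int.mod a 2 = 0 → PySem.Int.mod (base + 2*a) 4 = o) :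
    (PySem.List.pyRange 0 L2 1).foldl (fun acc a =>
        if PySem.Int.mod a 2 = 0 then
          acc ++ (PySem.List.pyRange e (L1-1) 4).map (g a)
        else
          acc ++ (PySem.List.pyRange o (L1-1) 4).map (g a)) []
    = (PySem.List.pyRange 0 L2 1).foldl (fun acc a =>
        (PySem.List.pyRange 0 (L1-1) 1).foldl (fun acc2 b =>
          if PySem.Int.mod b 4 = PySem.Int.mod (base + 2*a) 4 then acc2 ++ [g a b] else acc2) acc) [] := by
  refine (PySem.List.foldl_congr_mem _ _ _ _ ?_).symm
  intro acc a _
  rw [inner_row]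
  by_cases h : PySem.Int.mod a 2 = 0
  · rw [if_pos h, hbe a h]
  · rw [if_neg h, hbo a h]

theorem base_even (base e : Int) (h : base % 4 = e) (a : Int) (ha : PySem.Int.mod a 2 = 0) :
    PySem.Int.mod (base + 2*a) 4 = e := by
  rw [pymod_emod _ _ (by norm_num : (0:Int) ≤ 2)] at ha
  rw [pymod_emod _ _ (by norm_num : (0:Int) ≤ 4)]
  omega

theorem base_odd (base o : Int) (h : (base + 2) % 4 = o) (a : Int)
    (ha : ¬ PySem.Int.mod a 2 = 0) :
    PySem.Int.mod (base + 2*a) 4 = o := by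
  rw [pymod_emod _ _ (by norm_num : (0:Int) ≤ 2)] at ha
  rw [pymod_emod _ _ (by norm_num : (0:Int) ≤ 4)]
  omega

-- ===== VERDICT =====
theorem cz_layer_spec : Claim_equal_cz_layer := by
  intro L1 L2 p _ hpre
  have hp : p = 1 ∨ p = 2 ∨ p = 3 ∨ p = 4 ∨ p = 5 ∨ p = 6 ∨ p = 7 ∨ p = 8 := by
    obtain ⟨h1, h2⟩ := hpre; omega
  unfold Spec_cz_layer cz_layer cz_layer_alt
  rcases hp with h | h | h | h | h | h | h | h <;> subst h <;>
    simp only [show czBase 1 = 0 from rfl, show czBase 2 = 1 from rfl,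
               show czBase 3 = 1 from rfl, show czBase 4 = 0 from rfl,
               show czBase 5 = 2 from rfl, show czBase 6 = 3 from rfl,
               show czBase 7 = 1 from rfl, show czBase 8 = 2 from rfl,
               show czHoriz 1 = true from rfl, show czHoriz 2 = false from rfl,
               show czHoriz 3 = true from rfl, show czHoriz 4 = false from rfl,
               show czHoriz 5 = true from rfl, show czHoriz 6 = false from rfl,
               show czHoriz 7 = true from rfl, show czHoriz 8 = false from rfl,
               Bool.false_eq_true, reduceIte]
  · exact pattern_eq L1 L2 0 2 0 _ (base_even 0 0 (by decide)) (base_odd 0 2 (by decide))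
  · exact pattern_eq L1 L2 1 3 1 _ (base_even 1 1 (by decide)) (base_odd 1 3 (by decide))
  · exact pattern_eq L1 L2 1 3 1 _ (base_even 1 1 (by decide)) (base_odd 1 3 (by decide))
  · exact pattern_eq L1 L2 0 2 0 _ (base_even 0 0 (by decide)) (base_odd 0 2 (by decide))
  · exact pattern_eq L1 L2 2 0 2 _ (base_even 2 2 (by decide)) (base_odd 2 0 (by decide))
  · exact pattern_eq L1 L2 3 1 3 _ (base_even 3 3 (by decide)) (base_odd 3 1 (by decide))
  · exact pattern_eq L1 L2 1 3 1 _ (base_even 1 1 (by decide)) (base_odd 1 3 (by decide))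
  · exact pattern_eq L1 L2 2 0 2 _ (base_even 2 2 (by decide)) (base_odd 2 0 (by decide))
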